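-- pv_equiv track=rewrite | github.com/Carricossauro/lcc | Treino 2/cidade.py | tamanho
-- ===== SOURCE A (Python) =====
-- def caminhos(ruas, origem):
--     res = {origem:0}
--     orla = [(origem,0, [])]
--
--     while orla:
--         dest, tam, hist = orla.pop(0)
--         for rua in ruas:
--             if dest in rua:
--                 if dest == rua[0]:
--                     prox = rua[1]
--                 else:
--                     prox = rua[0]
--                 if prox in hist:
--                     continue
--                 novaDist = rua[2] + tam
--
--                 if prox not in res:
--                     res[prox] = novaDist
--                     orla.append( (prox, novaDist, hist + [dest]) )
--                 elif res[prox] > novaDist: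
--                     res[prox] = novaDist
--                     orla.append( (prox, novaDist, hist + [dest]) )
--
--     return res
--
-- def fixRuas(ruas):
--     final = []
--     for rua in ruas:
--         if rua[0] != rua[-1]:
--             final.append( (rua[0], rua[-1], len(rua)) )
--     return final
--
-- def tamanho(ruas):
--     ruas = fixRuas(ruas)
--     final = {}
--     vertices = set(list(map(lambda x: x[0], ruas)) + list(map(lambda x: x[1], ruas)))
--     m = -1
--
--     for x in vertices:
--         final[x] = caminhos(ruas, x)
--         for _,y in final[x].items():
--             m = max(y,m)
--
--     return m
-- ===== SOURCE B (Python) =====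
-- def tamanho(ruas):
--     edges = []
--     for r in ruas:
--         if r[0] != r[-1]:
--             edges.append((r[0], r[-1], len(r)))
--     verts = []
--     for a, b, _ in edges:
--         if a not in verts:
--             verts.append(a)
--     for a, b, _ in edges:
--         if b not in verts:
--             verts.append(b)
--     m = -1
--     for s in verts:
--         dist = {s: 0}
--         for _ in range(len(verts)):
--             new = dict(dist)
--             for a, b, w in edges:
--                 for u, v in ((a, b), (b, a)):
--                     if u in dist:
--                         d = dist[u] + w
--                         if v not in new or d < new[v]:
--                             new[v] = d
--             dist = new
--         for y in dist.values():
--             m = max(y, m)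
--     return m
-- ===== Notes on version B (the rewrite author's own statement) =====
-- stated objective: alternative
-- what changed: Replaces A's per-source FIFO label-correcting search that re-queues vertices with growing path-history lists by |V| rounds of synchronous Bellman-Ford relaxation over the edge list per source (and drops the unused dict-of-dicts).
import Mathlib
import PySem

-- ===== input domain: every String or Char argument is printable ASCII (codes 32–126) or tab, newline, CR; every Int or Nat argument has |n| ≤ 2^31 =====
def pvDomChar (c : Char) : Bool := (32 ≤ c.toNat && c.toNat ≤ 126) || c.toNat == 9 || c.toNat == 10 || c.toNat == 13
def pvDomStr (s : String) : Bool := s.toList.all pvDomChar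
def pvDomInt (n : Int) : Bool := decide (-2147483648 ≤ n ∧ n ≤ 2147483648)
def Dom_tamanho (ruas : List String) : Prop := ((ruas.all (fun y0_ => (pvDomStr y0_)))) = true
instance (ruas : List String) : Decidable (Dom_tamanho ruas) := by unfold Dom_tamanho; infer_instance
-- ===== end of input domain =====

-- B replaces A's per-source FIFO label-correcting search with path histories by |V| rounds of
-- synchronous Bellman-Ford edge relaxation per source; equal return value proved on Pre_.

-- ===== PORT A =====

-- fixRuas: keep strings whose first and last character differ, as (first, last, len) edges
def fixRuas (ruas : List String) : List (Char × Char × Int) :=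
  ruas.foldl (fun final rua =>
    let a := (PySem.Str.pyGet? rua 0).getD ' '
    let b := (PySem.Str.pyGet? rua (-1)).getD ' '
    if a ≠ b then final ++ [(a, b, PySem.Str.len rua)] else final) []

-- body of A's `for rua in ruas` relaxation pass for the popped entry (dest, tam, hist)
def relaxA (dest : Char) (tam : Int) (hist : List Char)
    (st : PySem.Dict Char Int × List (Char × Int × List Char)) (rua : Char × Char × Int) :
    PySem.Dict Char Int × List (Char × Int × List Char) :=
  if dest = rua.1 ∨ dest = rua.2.1 then
    let prox := if dest = rua.1 then rua.2.1 else rua.1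
    if prox ∈ hist then st
    else
      let nova := rua.2.2 + tam
      match st.1.get? prox with
      | none => (st.1.insert prox nova, st.2 ++ [(prox, nova, hist ++ [dest])])
      | some d => if d > nova then (st.1.insert prox nova, st.2 ++ [(prox, nova, hist ++ [dest])]) else st
  else st

-- A's `while orla:` loop; fuel is only a totality guard (proved sufficient below)
def loopA (ruas : List (Char × Char × Int)) :
    Nat → PySem.Dict Char Int → List (Char × Int × List Char) → PySem.Dict Char Int
  | _, res, [] => res
  | 0, res, _ :: _ => res
  | Nat.succ f, res, (dest, tam, hist) :: rest =>
      let st := ruas.foldl (relaxA dest tam hist) (res, rest)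
      loopA ruas f st.1 st.2

def caminhosA (ruas : List (Char × Char × Int)) (origem : Char) : PySem.Dict Char Int :=
  loopA ruas
    ((ruas.length + 2) ^ ((PySem.Set.ofList (ruas.map (·.1) ++ ruas.map (·.2.1))).length + 2))
    ((PySem.Dict.empty).insert origem 0) [(origem, 0, [])]

def tamanho (ruas : List String) : Int :=
  (PySem.Set.ofList ((fixRuas ruas).map (·.1) ++ (fixRuas ruas).map (·.2.1))).foldl
    (fun m x => ((caminhosA (fixRuas ruas) x).values).foldl (fun m y => max y m) m) (-1)

-- ===== PORT B =====

-- B's edge extraction loop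
def edgesB (ruas : List String) : List (Char × Char × Int) :=
  ruas.foldl (fun es r =>
    let a := (PySem.Str.pyGet? r 0).getD ' '
    let b := (PySem.Str.pyGet? r (-1)).getD ' '
    if a ≠ b then es ++ [(a, b, PySem.Str.len r)] else es) []

-- B's vertex list: first endpoints, then second endpoints, appending unseen ones
def vertsB (es : List (Char × Char × Int)) : List Char :=
  es.foldl (fun vs e => PySem.Set.add vs e.2.1)
    (es.foldl (fun vs e => PySem.Set.add vs e.1) PySem.Set.empty)

-- `if u in dist: d = dist[u] + w; if v not in new or d < new[v]: new[v] = d`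
def bfRelax (dist nd : PySem.Dict Char Int) (u v : Char) (w : Int) : PySem.Dict Char Int :=
  match dist.get? u with
  | none => nd
  | some du =>
    match nd.get? v with
    | none => nd.insert v (du + w)
    | some dv => if du + w < dv then nd.insert v (du + w) else nd

-- loop body: `for u, v in ((a, b), (b, a)): …` unrolled
def bfEdge (dist : PySem.Dict Char Int) (nd : PySem.Dict Char Int) (e : Char × Char × Int) :
    PySem.Dict Char Int :=
  bfRelax dist (bfRelax dist nd e.1 e.2.1 e.2.2) e.2.1 e.1 e.2.2

-- one synchronous round: `new = dict(dist); for a, b, w in edges: …; dist = new`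
def bfRound (es : List (Char × Char × Int)) (dist : PySem.Dict Char Int) : PySem.Dict Char Int :=
  es.foldl (bfEdge dist) dist

-- `dist = {s: 0}; for _ in range(rounds): dist = round(dist)`
def bfFrom (es : List (Char × Char × Int)) (rounds : Nat) (s : Char) : PySem.Dict Char Int :=
  (List.range rounds).foldl (fun d _ => bfRound es d) ((PySem.Dict.empty).insert s 0)

def tamanho_alt (ruas : List String) : Int :=
  (vertsB (edgesB ruas)).foldl
    (fun m s => ((bfFrom (edgesB ruas) (vertsB (edgesB ruas)).length s).values).foldl
      (fun m y => max y m) m) (-1)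

-- ===== PRECONDITION & SPEC =====
-- Pre_ excludes exactly the inputs containing an empty string, on which A (and B) raises IndexError (r[0]).
def Pre_tamanho (ruas : List String) : Prop := ∀ r ∈ ruas, r ≠ ""
instance (ruas : List String) : Decidable (Pre_tamanho ruas) := by unfold Pre_tamanho; infer_instance

def pvWitness_tamanho : List String := ["ab", "bc", "ca", "ad"]

def Spec_tamanho (ruas : List String) (out : Int) : Prop := out = tamanho_alt ruas
instance (ruas : List String) (out : Int) : Decidable (Spec_tamanho ruas out) := by unfold Spec_tamanho; infer_instance

-- ===== CLAIM (what is proved, stated in full; the proofs are below) =====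
def Claim_equal_tamanho : Prop := ∀ (ruas : List String), Dom_tamanho ruas → Pre_tamanho ruas → Spec_tamanho ruas (tamanho ruas)

-- ===== LEMMAS AND PROOFS =====

-- one undirected use of an edge of l
def Step (l : List (Char × Char × Int)) (u v : Char) (w : Int) : Prop :=
  ∃ a b, (a, b, w) ∈ l ∧ ((u = a ∧ v = b) ∨ (u = b ∧ v = a))

-- walk from s to v of cost c whose earlier vertices (in order) are h
inductive TW (es : List (Char × Char × Int)) (s : Char) : List Char → Char → Int → Prop
  | refl : TW es s [] s 0
  | snoc {h : List Char} {u v : Char} {c w : Int} :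
      TW es s h u c → Step es u v w → TW es s (h ++ [u]) v (c + w)

def Reach (es : List (Char × Char × Int)) (s v : Char) : Prop := ∃ h c, TW es s h v c

def MinCost (es : List (Char × Char × Int)) (s v : Char) (c : Int) : Prop :=
  (∃ h, TW es s h v c) ∧ ∀ h' c', TW es s h' v c' → c ≤ c'

-- edges produced by fixRuas have distinct endpoints and weight ≥ 2
def GoodEdges (l : List (Char × Char × Int)) : Prop := ∀ e ∈ l, e.1 ≠ e.2.1 ∧ 2 ≤ e.2.2

def resLE (d : PySem.Dict Char Int) (x : Char) (c : Int) : Prop :=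
  ∃ c', d.get? x = some c' ∧ c' ≤ c

-- walk whose every proper prefix endpoint already has a res value bounded by the prefix cost
inductive GEW (es : List (Char × Char × Int)) (d : PySem.Dict Char Int) (s : Char) :
    List Char → Char → Int → Prop
  | refl : GEW es d s [] s 0
  | snoc {h : List Char} {u v : Char} {c w : Int} :
      GEW es d s h u c → Step es u v w → resLE d u c → GEW es d s (h ++ [u]) v (c + w)

def DecFrom (d d' : PySem.Dict Char Int) : Prop :=
  ∀ v c, d.get? v = some c → ∃ c' ≤ c, d'.get? v = some c'

def Sound (es : List (Char × Char × Int)) (s : Char) (d : PySem.Dict Char Int) : Prop :=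
  ∀ v c, d.get? v = some c → ∃ h, TW es s h v c

def Closed1 (es : List (Char × Char × Int)) (d : PySem.Dict Char Int) (u : Char) (c : Int) : Prop :=
  ∀ v w, Step es u v w → resLE d v (w + c)

def Pending (es : List (Char × Char × Int)) (s : Char) (d : PySem.Dict Char Int)
    (q : List (Char × Int × List Char)) : Prop :=
  ∀ u c, d.get? u = some c → MinCost es s u c → (∃ hh, (u, c, hh) ∈ q) ∨ Closed1 es d u c

def EntryOK (es : List (Char × Char × Int)) (V : List Char) (s : Char) (d : PySem.Dict Char Int)
    (e : Char × Int × List Char) : Prop :=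
  GEW es d s e.2.2 e.1 e.2.1 ∧ resLE d e.1 e.2.1 ∧ (e.2.2 ++ [e.1]).Nodup ∧ (∀ x ∈ e.2.2 ++ [e.1], x ∈ V)

def InvA (es : List (Char × Char × Int)) (V : List Char) (s : Char) (d : PySem.Dict Char Int)
    (q : List (Char × Int × List Char)) : Prop :=
  Sound es s d ∧ d.get? s = some 0 ∧ d.keys.Nodup ∧ (∀ e ∈ q, EntryOK es V s d e) ∧ Pending es s d q

def entW (E Vl : Nat) (e : Char × Int × List Char) : Nat := (E + 1) ^ (Vl + 1 - e.2.2.length)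

def muQ (E Vl : Nat) (q : List (Char × Int × List Char)) : Nat := (q.map (entW E Vl)).sum


-- ---------- basic facts ----------

theorem step_w {l : List (Char × Char × Int)} {u v : Char} {w : Int}
    (hg : GoodEdges l) (h : Step l u v w) : 2 ≤ w := by
  obtain ⟨a, b, hm, _⟩ := h
  exact (hg _ hm).2

theorem step_ne {l : List (Char × Char × Int)} {u v : Char} {w : Int}
    (hg : GoodEdges l) (h : Step l u v w) : u ≠ v := by
  obtain ⟨a, b, hm, hor⟩ := h
  have := (hg _ hm).1
  rcases hor with ⟨rfl, rfl⟩ | ⟨rfl, rfl⟩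
  · exact this
  · exact this.symm

theorem step_tail {e : Char × Char × Int} {l : List (Char × Char × Int)} {u v : Char} {w : Int}
    (h : Step l u v w) : Step (e :: l) u v w := by
  obtain ⟨a, b, hm, hor⟩ := h
  exact ⟨a, b, List.mem_cons_of_mem _ hm, hor⟩

theorem tw_nonneg {es : List (Char × Char × Int)} {s : Char} {h : List Char} {v : Char} {c : Int}
    (hg : GoodEdges es) (tw : TW es s h v c) : 0 ≤ c := by
  induction tw with
  | refl => omega
  | snoc tw0 stp ih => have := step_w hg stp; omega

theorem reach_min {es : List (Char × Char × Int)} {s v : Char}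
    (hg : GoodEdges es) (h : Reach es s v) : ∃ c, MinCost es s v c := by
  obtain ⟨h0, c0, tw0⟩ := h
  have hS : {n : ℕ | ∃ hh, TW es s hh v (n : Int)}.Nonempty := by
    refine ⟨c0.toNat, h0, ?_⟩
    rwa [Int.toNat_of_nonneg (tw_nonneg hg tw0)]
  obtain ⟨m, hm, hmin⟩ := Nat.lt_wfRel.wf.has_min _ hS
  refine ⟨(m : Int), hm, ?_⟩
  intro h' c' tw'
  have h0' : 0 ≤ c' := tw_nonneg hg tw'
  have hmem : c'.toNat ∈ {n : ℕ | ∃ hh, TW es s hh v (n : Int)} := by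
    refine ⟨h', ?_⟩
    rwa [Int.toNat_of_nonneg h0']
  have h2 : ¬ c'.toNat < m := hmin _ hmem
  omega

-- walks to any vertex mentioned in the history, as prefixes
theorem tw_mem_prefix {es : List (Char × Char × Int)} {s : Char} {l : List Char} {u : Char} {c : Int}
    (hg : GoodEdges es) (tw : TW es s l u c) :
    ∀ v ∈ l, ∃ h' c', TW es s h' v c' ∧ c' ≤ c ∧ (h' ++ [v]) <+: l := by
  induction tw with
  | refl => intro v hv; simp at hv
  | @snoc h0 u0 v0 c0 w0 tw0 stp ih =>
    intro v hv
    rcases List.mem_append.mp hv with hv0 | hv1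
    · obtain ⟨h', c', tw', hle, hpre⟩ := ih v hv0
      have hw := step_w hg stp
      exact ⟨h', c', tw', by omega, hpre.trans (List.prefix_append _ _)⟩
    · have hveq : v = u0 := by simpa using hv1
      subst hveq
      have hw := step_w hg stp
      exact ⟨h0, c0, tw0, by omega, List.prefix_rfl⟩

theorem tw_shrink {es : List (Char × Char × Int)} {s : Char}
    (hg : GoodEdges es) :
    ∀ (n : Nat) (h : List Char) (v : Char) (c : Int), h.length ≤ n → TW es s h v c →
      ∃ h' c', TW es s h' v c' ∧ c' ≤ c ∧ (h' ++ [v]).Nodup ∧ h'.length ≤ h.length := by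
  intro n
  induction n with
  | zero =>
    intro h v c hlen tw
    cases tw with
    | refl => exact ⟨[], 0, TW.refl, le_refl _, by simp, by simp⟩
    | snoc tw0 stp => simp at hlen
  | succ n ih =>
    intro h v c hlen tw
    cases tw with
    | refl => exact ⟨[], 0, TW.refl, le_refl _, by simp, by simp⟩
    | @snoc h0 u0 _ c0 w0 tw0 stp =>
      have hlen0 : h0.length ≤ n := by simp at hlen; omega
      obtain ⟨h0', c0', tw0', hle0, hnd0, hl0⟩ := ih h0 u0 c0 hlen0 tw0
      by_cases hv : v ∈ h0' ++ [u0]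
      · obtain ⟨h'', c'', tw'', hle'', hpre⟩ := tw_mem_prefix hg (TW.snoc tw0' stp) v hv
        have hw := step_w hg stp
        refine ⟨h'', c'', tw'', by omega, ?_, ?_⟩
        · exact (hpre.sublist.nodup hnd0)
        · have := hpre.length_le
          simp at this ⊢
          omega
      · refine ⟨h0' ++ [u0], c0' + w0, TW.snoc tw0' stp, by have := step_w hg stp; omega, ?_, ?_⟩
        · rw [← List.concat_eq_append, List.nodup_concat]
          exact ⟨hv, hnd0⟩
        · simp
          omega

theorem tw_memV {es : List (Char × Char × Int)} {s : Char} {V : List Char}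
    (hs : s ∈ V) (hV : ∀ u v w, Step es u v w → v ∈ V) :
    ∀ {h : List Char} {v : Char} {c : Int}, TW es s h v c → ∀ x ∈ h ++ [v], x ∈ V := by
  intro h v c tw
  induction tw with
  | refl => intro x hx; simp at hx; simpa [hx]
  | @snoc h0 u0 v0 c0 w0 tw0 stp ih =>
    intro x hx
    simp only [List.append_assoc, List.mem_append, List.mem_singleton] at hx ih
    rcases hx with hx | hx | hx
    · exact ih x (Or.inl hx)
    · exact ih x (Or.inr hx)
    · subst hx; exact hV _ _ _ stp

-- ---------- vertex list ----------

theorem vertsB_eq (es : List (Char × Char × Int)) :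
    vertsB es = PySem.Set.ofList (es.map (·.1) ++ es.map (·.2.1)) := by
  show vertsB es = (es.map (·.1) ++ es.map (·.2.1)).foldl PySem.Set.add PySem.Set.empty
  rw [List.foldl_append, List.foldl_map, List.foldl_map]
  rfl

theorem mem_vertsB {es : List (Char × Char × Int)} {u v : Char} {w : Int}
    (h : Step es u v w) : u ∈ vertsB es ∧ v ∈ vertsB es := by
  rw [vertsB_eq, PySem.Set.mem_ofList, PySem.Set.mem_ofList]
  obtain ⟨a, b, hm, hor⟩ := h
  have ha : a ∈ es.map (·.1) ++ es.map (·.2.1) :=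
    List.mem_append.mpr (Or.inl (List.mem_map.mpr ⟨(a, b, w), hm, rfl⟩))
  have hb : b ∈ es.map (·.1) ++ es.map (·.2.1) :=
    List.mem_append.mpr (Or.inr (List.mem_map.mpr ⟨(a, b, w), hm, rfl⟩))
  rcases hor with ⟨rfl, rfl⟩ | ⟨rfl, rfl⟩ <;> exact ⟨by assumption, by assumption⟩

-- ---------- B side: one relaxation ----------

theorem bfRelax_none {dist nd : PySem.Dict Char Int} {u v : Char} {w : Int}
    (h1 : dist.get? u = none) : bfRelax dist nd u v w = nd := by
  unfold bfRelax
  rw [h1]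

theorem bfRelax_some_none {dist nd : PySem.Dict Char Int} {u v : Char} {w du : Int}
    (h1 : dist.get? u = some du) (h2 : nd.get? v = none) :
    bfRelax dist nd u v w = nd.insert v (du + w) := by
  unfold bfRelax
  rw [h1, h2]

theorem bfRelax_some_lt {dist nd : PySem.Dict Char Int} {u v : Char} {w du dv : Int}
    (h1 : dist.get? u = some du) (h2 : nd.get? v = some dv) (h : du + w < dv) :
    bfRelax dist nd u v w = nd.insert v (du + w) := by
  unfold bfRelax
  rw [h1, h2]
  simp [h]

theorem bfRelax_some_ge {dist nd : PySem.Dict Char Int} {u v : Char} {w du dv : Int}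
    (h1 : dist.get? u = some du) (h2 : nd.get? v = some dv) (h : ¬ du + w < dv) :
    bfRelax dist nd u v w = nd := by
  unfold bfRelax
  rw [h1, h2]
  simp [h]

theorem bfr_dec (dist nd : PySem.Dict Char Int) (u v : Char) (w : Int) :
    ∀ x c, nd.get? x = some c → ∃ c' ≤ c, (bfRelax dist nd u v w).get? x = some c' := by
  intro x c hx
  cases h1 : dist.get? u with
  | none => rw [bfRelax_none h1]; exact ⟨c, le_refl _, hx⟩
  | some du =>
    cases h2 : nd.get? v with
    | none =>
      have hxv : x ≠ v := by intro h; rw [h, h2] at hx; cases hx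
      rw [bfRelax_some_none h1 h2]
      exact ⟨c, le_refl _, by rw [PySem.Dict.get?_insert_of_ne _ _ hxv]; exact hx⟩
    | some dv =>
      by_cases hlt : du + w < dv
      · rw [bfRelax_some_lt h1 h2 hlt]
        by_cases hxv : x = v
        · subst hxv
          have hcd : c = dv := by rw [hx] at h2; cases h2; rfl
          exact ⟨du + w, by omega, PySem.Dict.get?_insert_self _ _ _⟩
        · exact ⟨c, le_refl _, by rw [PySem.Dict.get?_insert_of_ne _ _ hxv]; exact hx⟩
      · rw [bfRelax_some_ge h1 h2 hlt]
        exact ⟨c, le_refl _, hx⟩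

theorem bfr_new (dist nd : PySem.Dict Char Int) (u v : Char) (w : Int) :
    ∀ x c, (bfRelax dist nd u v w).get? x = some c →
      nd.get? x = some c ∨ (x = v ∧ ∃ du, dist.get? u = some du ∧ c = du + w) := by
  intro x c hx
  cases h1 : dist.get? u with
  | none => rw [bfRelax_none h1] at hx; exact Or.inl hx
  | some du =>
    cases h2 : nd.get? v with
    | none =>
      rw [bfRelax_some_none h1 h2] at hx
      by_cases hxv : x = v
      · subst hxv
        rw [PySem.Dict.get?_insert_self] at hx
        exact Or.inr ⟨rfl, du, rfl, by cases hx; rfl⟩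
      · rw [PySem.Dict.get?_insert_of_ne _ _ hxv] at hx; exact Or.inl hx
    | some dv =>
      by_cases hlt : du + w < dv
      · rw [bfRelax_some_lt h1 h2 hlt] at hx
        by_cases hxv : x = v
        · subst hxv
          rw [PySem.Dict.get?_insert_self] at hx
          exact Or.inr ⟨rfl, du, rfl, by cases hx; rfl⟩
        · rw [PySem.Dict.get?_insert_of_ne _ _ hxv] at hx; exact Or.inl hx
      · rw [bfRelax_some_ge h1 h2 hlt] at hx; exact Or.inl hx

theorem bfr_done (dist nd : PySem.Dict Char Int) (u v : Char) (w : Int) {du : Int}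
    (hdu : dist.get? u = some du) :
    ∃ c ≤ du + w, (bfRelax dist nd u v w).get? v = some c := by
  cases h2 : nd.get? v with
  | none => rw [bfRelax_some_none hdu h2]; exact ⟨du + w, le_refl _, PySem.Dict.get?_insert_self _ _ _⟩
  | some dv =>
    by_cases hlt : du + w < dv
    · rw [bfRelax_some_lt hdu h2 hlt]
      exact ⟨du + w, le_refl _, PySem.Dict.get?_insert_self _ _ _⟩
    · rw [bfRelax_some_ge hdu h2 hlt]
      exact ⟨dv, by omega, h2⟩

theorem bfr_nodup (dist nd : PySem.Dict Char Int) (u v : Char) (w : Int)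
    (h : nd.keys.Nodup) : (bfRelax dist nd u v w).keys.Nodup := by
  cases h1 : dist.get? u with
  | none => rw [bfRelax_none h1]; exact h
  | some du =>
    cases h2 : nd.get? v with
    | none => rw [bfRelax_some_none h1 h2]; exact PySem.Dict.nodup_keys_insert _ _ _ h
    | some dv =>
      by_cases hlt : du + w < dv
      · rw [bfRelax_some_lt h1 h2 hlt]; exact PySem.Dict.nodup_keys_insert _ _ _ h
      · rw [bfRelax_some_ge h1 h2 hlt]; exact h

-- edge body = two relaxations
theorem bfe_dec (dist nd : PySem.Dict Char Int) (e : Char × Char × Int) :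
    ∀ x c, nd.get? x = some c → ∃ c' ≤ c, (bfEdge dist nd e).get? x = some c' := by
  intro x c hx
  obtain ⟨c1, hc1, h1⟩ := bfr_dec dist nd e.1 e.2.1 e.2.2 x c hx
  obtain ⟨c2, hc2, h2⟩ := bfr_dec dist _ e.2.1 e.1 e.2.2 x c1 h1
  exact ⟨c2, by omega, h2⟩

theorem bfe_new (dist nd : PySem.Dict Char Int) (e : Char × Char × Int) :
    ∀ x c, (bfEdge dist nd e).get? x = some c →
      nd.get? x = some c ∨ ∃ u w du, Step [e] u x w ∧ dist.get? u = some du ∧ c = du + w := by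
  intro x c hx
  rcases bfr_new dist _ e.2.1 e.1 e.2.2 x c hx with h | ⟨rfl, du, hdu, rfl⟩
  · rcases bfr_new dist nd e.1 e.2.1 e.2.2 x c h with h' | ⟨rfl, du, hdu, rfl⟩
    · exact Or.inl h'
    · exact Or.inr ⟨e.1, e.2.2, du, ⟨e.1, e.2.1, by simp, Or.inl ⟨rfl, rfl⟩⟩, hdu, rfl⟩
  · exact Or.inr ⟨e.2.1, e.2.2, du, ⟨e.1, e.2.1, by simp, Or.inr ⟨rfl, rfl⟩⟩, hdu, rfl⟩

theorem bfe_done (dist nd : PySem.Dict Char Int) (e : Char × Char × Int) {u x : Char} {w du : Int}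
    (hstep : Step [e] u x w) (hdu : dist.get? u = some du) :
    ∃ c ≤ du + w, (bfEdge dist nd e).get? x = some c := by
  obtain ⟨a, b, hm, hor⟩ := hstep
  have he : (a, b, w) = e := by simpa using hm
  subst he
  rcases hor with ⟨rfl, rfl⟩ | ⟨rfl, rfl⟩
  · obtain ⟨c1, hc1, h1⟩ := bfr_done dist nd u x w (du := du) hdu
    obtain ⟨c2, hc2, h2⟩ := bfr_dec dist _ x u w _ _ h1
    exact ⟨c2, by omega, h2⟩
  · exact bfr_done dist _ u x w hdu

theorem bfe_nodup (dist nd : PySem.Dict Char Int) (e : Char × Char × Int)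
    (h : nd.keys.Nodup) : (bfEdge dist nd e).keys.Nodup :=
  bfr_nodup _ _ _ _ _ (bfr_nodup _ _ _ _ _ h)

-- folds of the edge body
theorem bfold_dec (dist : PySem.Dict Char Int) :
    ∀ (l : List (Char × Char × Int)) (nd : PySem.Dict Char Int) x c,
      nd.get? x = some c → ∃ c' ≤ c, (l.foldl (bfEdge dist) nd).get? x = some c' := by
  intro l
  induction l with
  | nil => intro nd x c hx; exact ⟨c, le_refl _, hx⟩
  | cons e l ih =>
    intro nd x c hx
    obtain ⟨c1, hc1, h1⟩ := bfe_dec dist nd e x c hx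
    obtain ⟨c2, hc2, h2⟩ := ih _ x c1 h1
    exact ⟨c2, by omega, h2⟩

theorem bfold_new (dist : PySem.Dict Char Int) :
    ∀ (l : List (Char × Char × Int)) (nd : PySem.Dict Char Int) x c,
      (l.foldl (bfEdge dist) nd).get? x = some c →
      nd.get? x = some c ∨ ∃ u w du, Step l u x w ∧ dist.get? u = some du ∧ c = du + w := by
  intro l
  induction l with
  | nil => intro nd x c hx; exact Or.inl hx
  | cons e l ih =>
    intro nd x c hx
    rcases ih _ x c hx with h | ⟨u, w, du, hstep, hdu, rfl⟩
    · rcases bfe_new dist nd e x c h with h' | ⟨u, w, du, hstep, hdu, rfl⟩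
      · exact Or.inl h'
      · obtain ⟨a, b, hm, hor⟩ := hstep
        have he : (a, b, w) = e := by simpa using hm
        exact Or.inr ⟨u, w, du, ⟨a, b, by rw [he]; exact List.mem_cons_self, hor⟩, hdu, rfl⟩
    · exact Or.inr ⟨u, w, du, step_tail hstep, hdu, rfl⟩

theorem bfold_done (dist : PySem.Dict Char Int) :
    ∀ (l : List (Char × Char × Int)) (nd : PySem.Dict Char Int) {u x : Char} {w du : Int},
      Step l u x w → dist.get? u = some du →
      ∃ c ≤ du + w, (l.foldl (bfEdge dist) nd).get? x = some c := by
  intro l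
  induction l with
  | nil => intro nd u x w du hstep _; obtain ⟨a, b, hm, _⟩ := hstep; simp at hm
  | cons e l ih =>
    intro nd u x w du hstep hdu
    obtain ⟨a, b, hm, hor⟩ := hstep
    rcases List.mem_cons.mp hm with he | hm'
    · obtain ⟨c1, hc1, h1⟩ := bfe_done dist nd e (u := u) (x := x) (w := w)
        ⟨a, b, by rw [← he]; exact List.mem_singleton_self _, hor⟩ hdu
      obtain ⟨c2, hc2, h2⟩ := bfold_dec dist l _ x c1 h1
      exact ⟨c2, by omega, h2⟩
    · exact ih _ ⟨a, b, hm', hor⟩ hdu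

theorem bfold_nodup (dist : PySem.Dict Char Int) :
    ∀ (l : List (Char × Char × Int)) (nd : PySem.Dict Char Int),
      nd.keys.Nodup → (l.foldl (bfEdge dist) nd).keys.Nodup := by
  intro l
  induction l with
  | nil => intro nd h; exact h
  | cons e l ih => intro nd h; exact ih _ (bfe_nodup dist nd e h)

-- iterating rounds
theorem bfFrom_succ (es : List (Char × Char × Int)) (k : Nat) (s : Char) :
    bfFrom es (k + 1) s = bfRound es (bfFrom es k s) := by
  unfold bfFrom
  rw [List.range_succ, List.foldl_append]
  rfl

theorem bfFrom_zero (es : List (Char × Char × Int)) (s : Char) :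
    bfFrom es 0 s = (PySem.Dict.empty).insert s 0 := rfl

theorem init_get? (s x : Char) :
    ((PySem.Dict.empty : PySem.Dict Char Int).insert s 0).get? x = if x = s then some 0 else none := by
  by_cases hx : x = s
  · subst hx; simp [PySem.Dict.get?_insert_self]
  · rw [PySem.Dict.get?_insert_of_ne _ _ hx, PySem.Dict.get?_empty]
    simp [hx]

theorem bf_sound (es : List (Char × Char × Int)) (s : Char) :
    ∀ k v c, (bfFrom es k s).get? v = some c → ∃ h, TW es s h v c := by
  intro k
  induction k with
  | zero =>
    intro v c h
    rw [bfFrom_zero, init_get?] at h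
    by_cases hv : v = s
    · rw [if_pos hv] at h
      cases h
      subst hv
      exact ⟨[], TW.refl⟩
    · rw [if_neg hv] at h; cases h
  | succ k ih =>
    intro v c h
    rw [bfFrom_succ] at h
    rcases bfold_new _ _ _ _ _ h with h' | ⟨u, w, du, hstep, hdu, rfl⟩
    · exact ih v c h'
    · obtain ⟨hh, twu⟩ := ih u du hdu
      exact ⟨hh ++ [u], TW.snoc twu hstep⟩

theorem bf_szero (es : List (Char × Char × Int)) (s : Char) :
    ∀ k, ∃ c ≤ (0 : Int), (bfFrom es k s).get? s = some c := by
  intro k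
  induction k with
  | zero => exact ⟨0, le_refl _, by rw [bfFrom_zero, init_get?]; simp⟩
  | succ k ih =>
    obtain ⟨c, hc, h⟩ := ih
    rw [bfFrom_succ]
    obtain ⟨c', hc', h'⟩ := bfold_dec _ _ _ _ _ h
    exact ⟨c', by omega, h'⟩

theorem bf_upper (es : List (Char × Char × Int)) (s : Char) :
    ∀ k (h : List Char) (v : Char) (c : Int), TW es s h v c → h.length ≤ k →
      ∃ c' ≤ c, (bfFrom es k s).get? v = some c' := by
  intro k
  induction k with
  | zero =>
    intro h v c tw hlen
    cases tw with
    | refl => exact ⟨0, le_refl _, by rw [bfFrom_zero, init_get?]; simp⟩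
    | snoc tw0 stp => simp at hlen
  | succ k ih =>
    intro h v c tw hlen
    cases tw with
    | refl =>
      obtain ⟨c', hc', h'⟩ := bf_szero es s (k + 1)
      exact ⟨c', hc', h'⟩
    | @snoc h0 u0 v0 c0 w0 tw0 stp =>
      have hlen0 : h0.length ≤ k := by simp at hlen; omega
      obtain ⟨cu, hcu, hu⟩ := ih h0 u0 c0 tw0 hlen0
      rw [bfFrom_succ]
      obtain ⟨c', hc', h'⟩ := bfold_done (bfFrom es k s) es _ stp hu
      exact ⟨c', by omega, h'⟩

theorem bf_nodup (es : List (Char × Char × Int)) (s : Char) :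
    ∀ k, (bfFrom es k s).keys.Nodup := by
  intro k
  induction k with
  | zero =>
    rw [bfFrom_zero]
    exact PySem.Dict.nodup_keys_insert _ _ _
      (by simpa using PySem.Dict.nodup_keys_empty (κ := Char) (ν := Int))
  | succ k ih =>
    rw [bfFrom_succ]
    exact bfold_nodup _ _ _ ih

theorem bf_char (es : List (Char × Char × Int)) (s : Char)
    (hg : GoodEdges es) (hs : s ∈ vertsB es) :
    ∀ v c, (bfFrom es (vertsB es).length s).get? v = some c ↔ MinCost es s v c := by
  have hchar : ∀ v c, MinCost es s v c → (bfFrom es (vertsB es).length s).get? v = some c := by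
    intro v c hmin
    obtain ⟨⟨h, tw⟩, hle⟩ := hmin
    obtain ⟨h', c', tw', hle', hnd, _⟩ := tw_shrink hg h.length h v c (le_refl _) tw
    have hc' : c' = c := le_antisymm hle' (hle _ _ tw')
    rw [hc'] at tw'
    have hsub : ∀ x ∈ h' ++ [v], x ∈ vertsB es :=
      tw_memV hs (fun u v w hst => (mem_vertsB hst).2) tw'
    have hlen : (h' ++ [v]).length ≤ (vertsB es).length :=
      (List.subperm_of_subset hnd hsub).length_le
    have hlen' : h'.length ≤ (vertsB es).length := by simp at hlen; omega
    obtain ⟨c2, hc2, h2⟩ := bf_upper es s (vertsB es).length h' v c tw' hlen'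
    obtain ⟨hh2, tw2⟩ := bf_sound es s _ v c2 h2
    have hcc : c ≤ c2 := hle _ _ tw2
    have hc2c : c2 = c := by omega
    rwa [hc2c] at h2
  intro v c
  constructor
  · intro hvc
    obtain ⟨hh, tw⟩ := bf_sound es s _ v c hvc
    obtain ⟨cm, hm⟩ := reach_min hg ⟨_, _, tw⟩
    have hcm := hchar v cm hm
    rw [hvc] at hcm
    injection hcm with hcm
    rw [hcm]
    exact hm
  · exact hchar v c

-- ---------- A side: generic facts ----------

theorem dec_refl (d : PySem.Dict Char Int) : DecFrom d d :=
  fun v c h => ⟨c, le_refl _, h⟩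

theorem dec_trans {d1 d2 d3 : PySem.Dict Char Int} (h1 : DecFrom d1 d2) (h2 : DecFrom d2 d3) :
    DecFrom d1 d3 := by
  intro v c h
  obtain ⟨c1, hc1, hh1⟩ := h1 v c h
  obtain ⟨c2, hc2, hh2⟩ := h2 v c1 hh1
  exact ⟨c2, by omega, hh2⟩

theorem resLE_mono {d d' : PySem.Dict Char Int} {x : Char} {c : Int}
    (hd : DecFrom d d') (h : resLE d x c) : resLE d' x c := by
  obtain ⟨c1, h1, hle⟩ := h
  obtain ⟨c2, hc2, h2⟩ := hd x c1 h1
  exact ⟨c2, h2, by omega⟩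

theorem resLE_weaken {d : PySem.Dict Char Int} {x : Char} {c c' : Int}
    (h : resLE d x c) (hcc : c ≤ c') : resLE d x c' := by
  obtain ⟨c1, h1, hle⟩ := h
  exact ⟨c1, h1, by omega⟩

theorem gew_mono {es : List (Char × Char × Int)} {d d' : PySem.Dict Char Int} {s : Char}
    (hd : DecFrom d d') :
    ∀ {h : List Char} {v : Char} {t : Int}, GEW es d s h v t → GEW es d' s h v t := by
  intro h v t hg
  induction hg with
  | refl => exact GEW.refl
  | snoc g stp hres ih => exact GEW.snoc ih stp (resLE_mono hd hres)

theorem gew_tw {es : List (Char × Char × Int)} {d : PySem.Dict Char Int} {s : Char}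
    {h : List Char} {v : Char} {t : Int} (hg : GEW es d s h v t) : TW es s h v t := by
  induction hg with
  | refl => exact TW.refl
  | snoc g stp hres ih => exact TW.snoc ih stp

theorem gew_bound {es : List (Char × Char × Int)} {d : PySem.Dict Char Int} {s : Char}
    (hge : GoodEdges es) :
    ∀ {h : List Char} {v : Char} {t : Int}, GEW es d s h v t → ∀ x ∈ h, resLE d x t := by
  intro h v t hg
  induction hg with
  | refl => intro x hx; simp at hx
  | @snoc h0 u0 v0 c0 w0 g stp hres ih =>
    intro x hx
    have hw := step_w hge stp
    rcases List.mem_append.mp hx with hx | hx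
    · exact resLE_weaken (ih x hx) (by omega)
    · have hxu : x = u0 := by simpa using hx
      subst hxu
      exact resLE_weaken hres (by omega)

-- ---------- A side: one relaxation of the pass ----------

def pxOf (dest : Char) (rua : Char × Char × Int) : Char :=
  if dest = rua.1 then rua.2.1 else rua.1

theorem step_pxOf {l : List (Char × Char × Int)} {dest : Char} {e : Char × Char × Int}
    (hm : e ∈ l) (hmatch : dest = e.1 ∨ dest = e.2.1) :
    Step l dest (pxOf dest e) e.2.2 := by
  by_cases h1 : dest = e.1
  · exact ⟨e.1, e.2.1, by simpa using hm, Or.inl ⟨h1, by simp [pxOf, h1]⟩⟩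
  · rcases hmatch with h | h
    · exact absurd h h1
    · exact ⟨e.1, e.2.1, by simpa using hm, Or.inr ⟨h, by simp [pxOf, h1]⟩⟩

theorem relaxA_nomatch {dest : Char} {tam : Int} {hist : List Char}
    {st : PySem.Dict Char Int × List (Char × Int × List Char)} {rua : Char × Char × Int}
    (hm : ¬ (dest = rua.1 ∨ dest = rua.2.1)) : relaxA dest tam hist st rua = st := by
  unfold relaxA
  rw [if_neg hm]

theorem relaxA_hist {dest : Char} {tam : Int} {hist : List Char}
    {st : PySem.Dict Char Int × List (Char × Int × List Char)} {rua : Char × Char × Int}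
    (hm : dest = rua.1 ∨ dest = rua.2.1) (hh : pxOf dest rua ∈ hist) :
    relaxA dest tam hist st rua = st := by
  simp only [pxOf] at hh
  simp only [relaxA]
  rw [if_pos hm, if_pos hh]

theorem relaxA_upd_none {dest : Char} {tam : Int} {hist : List Char}
    {st : PySem.Dict Char Int × List (Char × Int × List Char)} {rua : Char × Char × Int}
    (hm : dest = rua.1 ∨ dest = rua.2.1) (hh : pxOf dest rua ∉ hist)
    (hget : st.1.get? (pxOf dest rua) = none) :
    relaxA dest tam hist st rua =
      (st.1.insert (pxOf dest rua) (rua.2.2 + tam),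
       st.2 ++ [(pxOf dest rua, rua.2.2 + tam, hist ++ [dest])]) := by
  simp only [pxOf] at hh hget ⊢
  simp only [relaxA]
  rw [if_pos hm, if_neg hh, hget]

theorem relaxA_upd_lt {dest : Char} {tam : Int} {hist : List Char}
    {st : PySem.Dict Char Int × List (Char × Int × List Char)} {rua : Char × Char × Int} {dd : Int}
    (hm : dest = rua.1 ∨ dest = rua.2.1) (hh : pxOf dest rua ∉ hist)
    (hget : st.1.get? (pxOf dest rua) = some dd) (hlt : dd > rua.2.2 + tam) :
    relaxA dest tam hist st rua =
      (st.1.insert (pxOf dest rua) (rua.2.2 + tam),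
       st.2 ++ [(pxOf dest rua, rua.2.2 + tam, hist ++ [dest])]) := by
  simp only [pxOf] at hh hget ⊢
  simp only [relaxA]
  rw [if_pos hm, if_neg hh, hget]
  all_goals simp [hlt]

theorem relaxA_upd_ge {dest : Char} {tam : Int} {hist : List Char}
    {st : PySem.Dict Char Int × List (Char × Int × List Char)} {rua : Char × Char × Int} {dd : Int}
    (hm : dest = rua.1 ∨ dest = rua.2.1) (hh : pxOf dest rua ∉ hist)
    (hget : st.1.get? (pxOf dest rua) = some dd) (hlt : ¬ dd > rua.2.2 + tam) :
    relaxA dest tam hist st rua = st := by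
  simp only [pxOf] at hh hget
  simp only [relaxA]
  rw [if_pos hm, if_neg hh, hget]
  all_goals simp [hlt]

theorem rA_cases (dest : Char) (tam : Int) (hist : List Char)
    (st : PySem.Dict Char Int × List (Char × Int × List Char)) (rua : Char × Char × Int) :
    (relaxA dest tam hist st rua = st ∧
      (¬ (dest = rua.1 ∨ dest = rua.2.1) ∨ pxOf dest rua ∈ hist ∨
        resLE st.1 (pxOf dest rua) (rua.2.2 + tam))) ∨
    ((dest = rua.1 ∨ dest = rua.2.1) ∧ pxOf dest rua ∉ hist ∧
      (∀ dd, st.1.get? (pxOf dest rua) = some dd → rua.2.2 + tam < dd) ∧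
      relaxA dest tam hist st rua =
        (st.1.insert (pxOf dest rua) (rua.2.2 + tam),
         st.2 ++ [(pxOf dest rua, rua.2.2 + tam, hist ++ [dest])])) := by
  by_cases hm : dest = rua.1 ∨ dest = rua.2.1
  · by_cases hh : pxOf dest rua ∈ hist
    · exact Or.inl ⟨relaxA_hist hm hh, Or.inr (Or.inl hh)⟩
    · cases hget : st.1.get? (pxOf dest rua) with
      | none =>
        refine Or.inr ⟨hm, hh, ?_, relaxA_upd_none hm hh hget⟩
        intro dd h; cases h
      | some dd =>
        by_cases hlt : dd > rua.2.2 + tam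
        · refine Or.inr ⟨hm, hh, ?_, relaxA_upd_lt hm hh hget hlt⟩
          intro dd' h; cases h; omega
        · exact Or.inl ⟨relaxA_upd_ge hm hh hget hlt,
            Or.inr (Or.inr ⟨dd, hget, by omega⟩)⟩
  · exact Or.inl ⟨relaxA_nomatch hm, Or.inl hm⟩

-- ---------- A side: the pass over the edge list ----------

theorem pass_dec (dest : Char) (tam : Int) (hist : List Char) :
    ∀ (l : List (Char × Char × Int)) (st : PySem.Dict Char Int × List (Char × Int × List Char)),
      DecFrom st.1 (l.foldl (relaxA dest tam hist) st).1 := by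
  intro l
  induction l with
  | nil => intro st; exact dec_refl _
  | cons e l ih =>
    intro st
    rw [List.foldl_cons]
    refine dec_trans ?_ (ih (relaxA dest tam hist st e))
    rcases rA_cases dest tam hist st e with ⟨heq, _⟩ | ⟨_, _, himp, heq⟩
    · rw [heq]; exact dec_refl _
    · rw [heq]
      intro v c h
      by_cases hv : v = pxOf dest e
      · subst hv
        have := himp c h
        exact ⟨e.2.2 + tam, by omega, PySem.Dict.get?_insert_self _ _ _⟩
      · exact ⟨c, le_refl _, by rw [PySem.Dict.get?_insert_of_ne _ _ hv]; exact h⟩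

theorem pass_new (dest : Char) (tam : Int) (hist : List Char) :
    ∀ (l : List (Char × Char × Int)) (st : PySem.Dict Char Int × List (Char × Int × List Char)) x c,
      (l.foldl (relaxA dest tam hist) st).1.get? x = some c →
      st.1.get? x = some c ∨ ∃ w, Step l dest x w ∧ x ∉ hist ∧ c = w + tam := by
  intro l
  induction l with
  | nil => intro st x c h; exact Or.inl h
  | cons e l ih =>
    intro st x c h
    rw [List.foldl_cons] at h
    rcases ih _ x c h with h' | ⟨w, hstep, hx, rfl⟩
    · rcases rA_cases dest tam hist st e with ⟨heq, _⟩ | ⟨hm, hh, _, heq⟩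
      · rw [heq] at h'; exact Or.inl h'
      · rw [heq] at h'
        by_cases hx : x = pxOf dest e
        · subst hx
          rw [PySem.Dict.get?_insert_self] at h'
          refine Or.inr ⟨e.2.2, step_pxOf List.mem_cons_self hm, hh, ?_⟩
          cases h'
          omega
        · rw [PySem.Dict.get?_insert_of_ne _ _ hx] at h'; exact Or.inl h'
    · exact Or.inr ⟨w, step_tail hstep, hx, rfl⟩

theorem pass_queue (dest : Char) (tam : Int) (hist : List Char) :
    ∀ (l : List (Char × Char × Int)) (st : PySem.Dict Char Int × List (Char × Int × List Char)),
      ∃ P, (l.foldl (relaxA dest tam hist) st).2 = st.2 ++ P ∧ P.length ≤ l.length ∧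
        ∀ p ∈ P, p.2.2 = hist ++ [dest] ∧ p.1 ∉ hist ∧
          (∃ w, Step l dest p.1 w ∧ p.2.1 = w + tam) ∧
          resLE (l.foldl (relaxA dest tam hist) st).1 p.1 p.2.1 := by
  intro l
  induction l with
  | nil => intro st; exact ⟨[], by simp, by simp, by simp⟩
  | cons e l ih =>
    intro st
    obtain ⟨P, hP, hPlen, hPmem⟩ := ih (relaxA dest tam hist st e)
    rcases rA_cases dest tam hist st e with ⟨heq, _⟩ | ⟨hm, hh, _, heq⟩
    · refine ⟨P, by rw [List.foldl_cons, hP, heq], by simpa using Nat.le_succ_of_le hPlen, ?_⟩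
      intro p hp
      obtain ⟨h1, h2, ⟨w, hstep, h3⟩, h4⟩ := hPmem p hp
      exact ⟨h1, h2, ⟨w, step_tail hstep, h3⟩, by rw [List.foldl_cons]; exact h4⟩
    · refine ⟨(pxOf dest e, e.2.2 + tam, hist ++ [dest]) :: P, ?_, by simpa using hPlen, ?_⟩
      · rw [List.foldl_cons, hP, heq]
        simp
      · intro p hp
        rcases List.mem_cons.mp hp with rfl | hp'
        · refine ⟨rfl, hh, ⟨e.2.2, step_pxOf List.mem_cons_self hm, rfl⟩, ?_⟩
          have hget : (relaxA dest tam hist st e).1.get? (pxOf dest e) = some (e.2.2 + tam) := by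
            rw [heq]; exact PySem.Dict.get?_insert_self _ _ _
          obtain ⟨c2, hc2, h2⟩ := pass_dec dest tam hist l (relaxA dest tam hist st e) _ _ hget
          rw [List.foldl_cons]
          exact ⟨c2, h2, hc2⟩
        · obtain ⟨h1, h2, ⟨w, hstep, h3⟩, h4⟩ := hPmem p hp'
          exact ⟨h1, h2, ⟨w, step_tail hstep, h3⟩, by rw [List.foldl_cons]; exact h4⟩

theorem pass_done (dest : Char) (tam : Int) (hist : List Char) :
    ∀ (l : List (Char × Char × Int)), GoodEdges l →
      ∀ (st : PySem.Dict Char Int × List (Char × Int × List Char)) x (w : Int),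
      Step l dest x w → x ∈ hist ∨ resLE (l.foldl (relaxA dest tam hist) st).1 x (w + tam) := by
  intro l
  induction l with
  | nil => intro _ st x w hstep; obtain ⟨a, b, hm, _⟩ := hstep; simp at hm
  | cons e l ih =>
    intro hgl st x w hstep
    obtain ⟨a, b, hm, hor⟩ := hstep
    have hgl' : GoodEdges l := fun e' he' => hgl e' (List.mem_cons_of_mem _ he')
    rcases List.mem_cons.mp hm with he | hm'
    · -- the head edge relaxes (dest, x)
      rcases hor with ⟨rfl, rfl⟩ | ⟨rfl, rfl⟩
      · -- e = (dest, x, w)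
        subst he
        have hne : dest ≠ x := by simpa using (hgl (dest, x, w) List.mem_cons_self).1
        have hmatch : dest = (dest, x, w).1 ∨ dest = (dest, x, w).2.1 := Or.inl rfl
        have hx : pxOf dest (dest, x, w) = x := by simp [pxOf]
        by_cases hhist : x ∈ hist
        · exact Or.inl hhist
        · right
          rw [List.foldl_cons]
          rcases rA_cases dest tam hist st (dest, x, w) with ⟨heq, hca⟩ | ⟨_, _, _, heq⟩
          · rcases hca with hca | hca | hca
            · exact absurd hmatch hca
            · rw [hx] at hca; exact absurd hca hhist
            · rw [heq]
              rw [hx] at hca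
              exact resLE_mono (pass_dec dest tam hist l st) hca
          · rw [heq, hx]
            have hget : ((st.1.insert x ((dest, x, w).2.2 + tam)).get? x) =
                some ((dest, x, w).2.2 + tam) :=
              PySem.Dict.get?_insert_self _ _ _
            obtain ⟨c2, hc2, h2⟩ := pass_dec dest tam hist l
              (st.1.insert x ((dest, x, w).2.2 + tam),
               st.2 ++ [(x, (dest, x, w).2.2 + tam, hist ++ [dest])]) _ _ hget
            exact ⟨c2, h2, by omega⟩
      · -- e = (x, dest, w)
        subst he
        have hne : x ≠ dest := by simpa using (hgl (x, dest, w) List.mem_cons_self).1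
        have hmatch : dest = (x, dest, w).1 ∨ dest = (x, dest, w).2.1 := Or.inr rfl
        have hx : pxOf dest (x, dest, w) = x := by simp [pxOf, Ne.symm hne]
        by_cases hhist : x ∈ hist
        · exact Or.inl hhist
        · right
          rw [List.foldl_cons]
          rcases rA_cases dest tam hist st (x, dest, w) with ⟨heq, hca⟩ | ⟨_, _, _, heq⟩
          · rcases hca with hca | hca | hca
            · exact absurd hmatch hca
            · rw [hx] at hca; exact absurd hca hhist
            · rw [heq]
              rw [hx] at hca
              exact resLE_mono (pass_dec dest tam hist l st) hca
          · rw [heq, hx]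
            have hget : ((st.1.insert x ((x, dest, w).2.2 + tam)).get? x) =
                some ((x, dest, w).2.2 + tam) :=
              PySem.Dict.get?_insert_self _ _ _
            obtain ⟨c2, hc2, h2⟩ := pass_dec dest tam hist l
              (st.1.insert x ((x, dest, w).2.2 + tam),
               st.2 ++ [(x, (x, dest, w).2.2 + tam, hist ++ [dest])]) _ _ hget
            exact ⟨c2, h2, by omega⟩
    · rcases ih hgl' (relaxA dest tam hist st e) x w ⟨a, b, hm', hor⟩ with h | h
      · exact Or.inl h
      · rw [List.foldl_cons]; exact Or.inr h

theorem pass_push (dest : Char) (tam : Int) (hist : List Char) :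
    ∀ (l : List (Char × Char × Int)) (st : PySem.Dict Char Int × List (Char × Int × List Char)) x c,
      (l.foldl (relaxA dest tam hist) st).1.get? x = some c →
      st.1.get? x = some c ∨ ∃ hh, (x, c, hh) ∈ (l.foldl (relaxA dest tam hist) st).2 := by
  intro l
  induction l with
  | nil => intro st x c h; exact Or.inl h
  | cons e l ih =>
    intro st x c h
    rw [List.foldl_cons] at h
    rcases ih _ x c h with h' | ⟨hh, hmem⟩
    · rcases rA_cases dest tam hist st e with ⟨heq, _⟩ | ⟨hm, hhist, _, heq⟩
      · rw [heq] at h'; exact Or.inl h'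
      · rw [heq] at h'
        by_cases hx : x = pxOf dest e
        · subst hx
          rw [PySem.Dict.get?_insert_self] at h'
          cases h'
          right
          refine ⟨hist ++ [dest], ?_⟩
          obtain ⟨P, hP, _, _⟩ := pass_queue dest tam hist l (relaxA dest tam hist st e)
          rw [List.foldl_cons, hP, heq]
          simp
        · rw [PySem.Dict.get?_insert_of_ne _ _ hx] at h'; exact Or.inl h'
    · exact Or.inr ⟨hh, by rw [List.foldl_cons]; exact hmem⟩

theorem pass_nodup (dest : Char) (tam : Int) (hist : List Char) :
    ∀ (l : List (Char × Char × Int)) (st : PySem.Dict Char Int × List (Char × Int × List Char)),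
      st.1.keys.Nodup → (l.foldl (relaxA dest tam hist) st).1.keys.Nodup := by
  intro l
  induction l with
  | nil => intro st h; exact h
  | cons e l ih =>
    intro st h
    rw [List.foldl_cons]
    apply ih
    rcases rA_cases dest tam hist st e with ⟨heq, _⟩ | ⟨_, _, _, heq⟩
    · rw [heq]; exact h
    · rw [heq]; exact PySem.Dict.nodup_keys_insert _ _ _ h

-- ---------- A side: the invariant is preserved by one iteration ----------

theorem pass_inv (es : List (Char × Char × Int)) (s : Char)
    (hg : GoodEdges es) (hs : s ∈ vertsB es)
    (d : PySem.Dict Char Int) (dest : Char) (tam : Int) (hist : List Char)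
    (rest : List (Char × Int × List Char))
    (hinv : InvA es (vertsB es) s d ((dest, tam, hist) :: rest)) :
    InvA es (vertsB es) s
      ((es.foldl (relaxA dest tam hist) (d, rest)).1)
      ((es.foldl (relaxA dest tam hist) (d, rest)).2) ∧
    ∃ P, (es.foldl (relaxA dest tam hist) (d, rest)).2 = rest ++ P ∧
      P.length ≤ es.length ∧ ∀ p ∈ P, p.2.2 = hist ++ [dest] := by
  obtain ⟨hsound, hz, hnd, hent, hpend⟩ := hinv
  have hgew : GEW es d s hist dest tam := (hent _ List.mem_cons_self).1
  have hres : resLE d dest tam := (hent _ List.mem_cons_self).2.1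
  have hndE : (hist ++ [dest]).Nodup := (hent _ List.mem_cons_self).2.2.1
  have hsubE : ∀ x ∈ hist ++ [dest], x ∈ vertsB es := (hent _ List.mem_cons_self).2.2.2
  have hdec : DecFrom d (es.foldl (relaxA dest tam hist) (d, rest)).1 :=
    pass_dec dest tam hist es (d, rest)
  obtain ⟨P, hP, hPlen, hPmem⟩ := pass_queue dest tam hist es (d, rest)
  -- soundness
  have hsound1 : Sound es s (es.foldl (relaxA dest tam hist) (d, rest)).1 := by
    intro v c hvc
    rcases pass_new dest tam hist es (d, rest) v c hvc with h | ⟨w, hstep, _, rfl⟩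
    · exact hsound v c h
    · refine ⟨hist ++ [dest], ?_⟩
      have tw := TW.snoc (gew_tw hgew) hstep
      rwa [Int.add_comm tam w] at tw
  -- zero at the source
  have hz1 : (es.foldl (relaxA dest tam hist) (d, rest)).1.get? s = some 0 := by
    obtain ⟨c, hc, h⟩ := hdec s 0 hz
    obtain ⟨hh, tw⟩ := hsound1 s c h
    have h0 := tw_nonneg hg tw
    have hc0 : c = 0 := by omega
    rwa [hc0] at h
  refine ⟨⟨hsound1, hz1, pass_nodup dest tam hist es (d, rest) hnd, ?_, ?_⟩,
    P, hP, hPlen, fun p hp => (hPmem p hp).1⟩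
  -- entries
  · intro p hp
    rw [hP] at hp
    rcases List.mem_append.mp hp with hp | hp
    · obtain ⟨g, r, n, sub⟩ := hent p (List.mem_cons_of_mem _ hp)
      exact ⟨gew_mono hdec g, resLE_mono hdec r, n, sub⟩
    · obtain ⟨hp1, hp2, ⟨w, hstep, hp3⟩, hp4⟩ := hPmem p hp
      obtain ⟨p1, pt, ph⟩ := p
      simp only at hp1 hp2 hp3 hp4 ⊢
      subst hp1 hp3
      have hnep : dest ≠ p1 := step_ne hg hstep
      have hmemv : p1 ∈ vertsB es := (mem_vertsB hstep).2
      refine ⟨?_, hp4, ?_, ?_⟩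
      · have g := GEW.snoc (gew_mono hdec hgew) hstep (resLE_mono hdec hres)
        show GEW es _ s (hist ++ [dest]) p1 (w + tam)
        rwa [Int.add_comm tam w] at g
      · show ((hist ++ [dest]) ++ [p1]).Nodup
        have hnp : p1 ∉ hist ++ [dest] := by
          simp only [List.mem_append, List.mem_singleton]
          rintro (h | h)
          · exact hp2 h
          · exact hnep h.symm
        rw [← List.concat_eq_append, List.nodup_concat]
        exact ⟨hnp, hndE⟩
      · intro x hx
        rcases List.mem_append.mp hx with hx | hx
        · exact hsubE x hx
        · have hxp : x = p1 := by simpa using hx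
          rwa [hxp]
  -- pending
  · intro u c hu hmin
    rcases pass_push dest tam hist es (d, rest) u c hu with hold | ⟨hh, hmem⟩
    · rcases hpend u c hold hmin with ⟨hh, hmem⟩ | hclosed
      · rcases List.mem_cons.mp hmem with he | hmem'
        · -- the popped entry was the pending one: now all its edges are relaxed
          obtain ⟨hu', hc', hh'⟩ : u = dest ∧ c = tam ∧ hh = hist := by
            refine ⟨?_, ?_, ?_⟩ <;> · cases he; rfl
          right
          intro v w hstep
          rw [hu'] at hstep
          rw [hc']
          rcases pass_done dest tam hist es hg (d, rest) v w hstep with hv | hv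
          · have hb := gew_bound hg hgew v hv
            have hw := step_w hg hstep
            exact resLE_mono hdec (resLE_weaken hb (by omega))
          · exact hv
        · exact Or.inl ⟨hh, by rw [hP]; exact List.mem_append.mpr (Or.inl hmem')⟩
      · right
        intro v w hstep
        exact resLE_mono hdec (hclosed v w hstep)
    · exact Or.inl ⟨hh, hmem⟩

-- ---------- measure ----------

theorem mu_append (E Vl : Nat) (a b : List (Char × Int × List Char)) :
    muQ E Vl (a ++ b) = muQ E Vl a + muQ E Vl b := by
  simp [muQ]

theorem mu_step (E Vl : Nat) (dest : Char) (tam : Int) (hist : List Char)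
    (rest P : List (Char × Int × List Char))
    (hl : hist.length + 1 ≤ Vl) (hP : P.length ≤ E)
    (hPh : ∀ p ∈ P, p.2.2 = hist ++ [dest]) :
    muQ E Vl (rest ++ P) < muQ E Vl ((dest, tam, hist) :: rest) := by
  rw [mu_append]
  have hsum : muQ E Vl P ≤ P.length * (E + 1) ^ (Vl - hist.length) := by
    have h := List.sum_le_card_nsmul (P.map (entW E Vl)) ((E + 1) ^ (Vl - hist.length)) ?_
    · simpa [muQ, smul_eq_mul] using h
    · intro x hx
      obtain ⟨p, hp, rfl⟩ := List.mem_map.mp hx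
      have h1 := hPh p hp
      have h2 : Vl + 1 - (hist.length + 1) = Vl - hist.length := by omega
      simp [entW, h1, h2]
  have hpos : 0 < (E + 1) ^ (Vl - hist.length) := Nat.pow_pos (by omega)
  have hk : Vl + 1 - hist.length = (Vl - hist.length) + 1 := by omega
  have hlt : P.length * (E + 1) ^ (Vl - hist.length) < (E + 1) ^ (Vl + 1 - hist.length) := by
    rw [hk, pow_succ]
    calc P.length * (E + 1) ^ (Vl - hist.length)
        ≤ E * (E + 1) ^ (Vl - hist.length) := mul_le_mul_right' hP _
      _ = (E + 1) ^ (Vl - hist.length) * E := by ring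
      _ < (E + 1) ^ (Vl - hist.length) * (E + 1) := mul_lt_mul_of_pos_left (by omega) hpos
  have hco : muQ E Vl ((dest, tam, hist) :: rest) =
      (E + 1) ^ (Vl + 1 - hist.length) + muQ E Vl rest := by
    simp [muQ, entW]
  omega

-- ---------- the closed final state computes shortest distances ----------

theorem closed_char (es : List (Char × Char × Int)) (s : Char) (d : PySem.Dict Char Int)
    (hg : GoodEdges es) (hsound : Sound es s d) (hz : d.get? s = some 0)
    (hcl : ∀ u c, d.get? u = some c → MinCost es s u c → Closed1 es d u c) :
    ∀ v c, d.get? v = some c ↔ MinCost es s v c := by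
  have tight : ∀ n v c, MinCost es s v c → c.toNat ≤ n → d.get? v = some c := by
    intro n
    induction n using Nat.strong_induction_on with
    | _ n ih =>
      intro v c hmin hcn
      obtain ⟨⟨h, tw⟩, hle⟩ := hmin
      cases tw with
      | refl => exact hz
      | @snoc h0 u0 _ c0 w0 tw0 stp =>
        have hw := step_w hg stp
        obtain ⟨cu, hminu⟩ := reach_min hg ⟨_, _, tw0⟩
        obtain ⟨hu', twu⟩ := hminu.1
        have hcu0 : 0 ≤ cu := tw_nonneg hg twu
        have hcule : cu ≤ c0 := hminu.2 _ _ tw0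
        have h1 : c0 + w0 ≤ cu + w0 := by
          have := hle _ _ (TW.snoc twu stp)
          omega
        have hc0 : 0 ≤ c0 := tw_nonneg hg tw0
        have hthu : d.get? u0 = some cu :=
          ih cu.toNat (by omega) u0 cu hminu (le_refl _)
        obtain ⟨c', hc', hle'⟩ := hcl u0 cu hthu hminu v w0 stp
        obtain ⟨hh', tw'⟩ := hsound v c' hc'
        have hcc : c0 + w0 ≤ c' := hle _ _ tw'
        have hce : c' = c0 + w0 := by omega
        rwa [hce] at hc'
  intro v c
  constructor
  · intro hvc
    obtain ⟨hh, tw⟩ := hsound v c hvc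
    obtain ⟨cm, hm⟩ := reach_min hg ⟨_, _, tw⟩
    have hcm := tight cm.toNat v cm hm (le_refl _)
    rw [hvc] at hcm
    injection hcm with hcm
    rw [hcm]
    exact hm
  · intro hm
    exact tight c.toNat v c hm (le_refl _)

-- ---------- the main loop ----------

theorem loopA_char (es : List (Char × Char × Int)) (s : Char)
    (hg : GoodEdges es) (hs : s ∈ vertsB es) :
    ∀ (fuel : Nat) (d : PySem.Dict Char Int) (q : List (Char × Int × List Char)),
      InvA es (vertsB es) s d q → muQ es.length (vertsB es).length q < fuel →
      (∀ v c, ((loopA es fuel d q).get? v = some c ↔ MinCost es s v c)) ∧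
        (loopA es fuel d q).keys.Nodup := by
  intro fuel
  induction fuel with
  | zero => intro d q _ hmu; exact absurd hmu (Nat.not_lt_zero _)
  | succ f ih =>
    intro d q hinv hmu
    match q with
    | [] =>
      obtain ⟨hsound, hz, hnd, _, hpend⟩ := hinv
      have hloop : loopA es (f + 1) d [] = d := rfl
      rw [hloop]
      refine ⟨closed_char es s d hg hsound hz ?_, hnd⟩
      intro u c hu hmin
      rcases hpend u c hu hmin with ⟨hh, hmem⟩ | hclosed
      · simp at hmem
      · exact hclosed
    | (dest, tam, hist) :: rest =>
      obtain ⟨hinv', P, hq, hPlen, hPh⟩ := pass_inv es s hg hs d dest tam hist rest hinv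
      have hndE : (hist ++ [dest]).Nodup := (hinv.2.2.2.1 _ List.mem_cons_self).2.2.1
      have hsubE : ∀ x ∈ hist ++ [dest], x ∈ vertsB es :=
        (hinv.2.2.2.1 _ List.mem_cons_self).2.2.2
      have hhl : hist.length + 1 ≤ (vertsB es).length := by
        have := (List.subperm_of_subset hndE hsubE).length_le
        simpa using this
      have hmu' : muQ es.length (vertsB es).length
          (es.foldl (relaxA dest tam hist) (d, rest)).2 < f := by
        rw [hq]
        have := mu_step es.length (vertsB es).length dest tam hist rest P hhl hPlen hPh
        omega
      have hloop : loopA es (f + 1) d ((dest, tam, hist) :: rest) =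
          loopA es f (es.foldl (relaxA dest tam hist) (d, rest)).1
            (es.foldl (relaxA dest tam hist) (d, rest)).2 := rfl
      rw [hloop]
      exact ih _ _ hinv' hmu'

theorem caminhosA_char (es : List (Char × Char × Int)) (s : Char)
    (hg : GoodEdges es) (hs : s ∈ vertsB es) :
    (∀ v c, ((caminhosA es s).get? v = some c ↔ MinCost es s v c)) ∧
      (caminhosA es s).keys.Nodup := by
  have hfuel : muQ es.length (vertsB es).length [(s, 0, [])] <
      (es.length + 2) ^ ((vertsB es).length + 2) := by
    have h1 : muQ es.length (vertsB es).length [(s, 0, [])] =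
        (es.length + 1) ^ ((vertsB es).length + 1) := by
      simp [muQ, entW]
    rw [h1]
    calc (es.length + 1) ^ ((vertsB es).length + 1)
        ≤ (es.length + 2) ^ ((vertsB es).length + 1) :=
          Nat.pow_le_pow_left (by omega) _
      _ < (es.length + 2) ^ ((vertsB es).length + 2) :=
          Nat.pow_lt_pow_right (by omega) (by omega)
  have hinv : InvA es (vertsB es) s ((PySem.Dict.empty).insert s 0) [(s, 0, [])] := by
    refine ⟨?_, ?_, ?_, ?_, ?_⟩
    · intro v c h
      rw [init_get?] at h
      by_cases hv : v = s
      · rw [if_pos hv] at h; cases h; subst hv; exact ⟨[], TW.refl⟩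
      · rw [if_neg hv] at h; cases h
    · rw [init_get?]; simp
    · exact PySem.Dict.nodup_keys_insert _ _ _
        (by simpa using PySem.Dict.nodup_keys_empty (κ := Char) (ν := Int))
    · intro e he
      have he' : e = (s, 0, []) := by simpa using he
      subst he'
      refine ⟨GEW.refl, ⟨0, by rw [init_get?]; simp, le_refl _⟩, by simp, ?_⟩
      intro x hx
      have hx' : x = s := by simpa using hx
      rwa [hx']
    · intro u c hu hmin
      rw [init_get?] at hu
      by_cases hv : u = s
      · rw [if_pos hv] at hu; cases hu; subst hv
        exact Or.inl ⟨[], by simp⟩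
      · rw [if_neg hv] at hu; cases hu
  have hmain := loopA_char es s hg hs
    ((es.length + 2) ^ ((vertsB es).length + 2))
    ((PySem.Dict.empty).insert s 0) [(s, 0, [])] hinv hfuel
  unfold caminhosA
  rw [← vertsB_eq]
  exact hmain

-- ---------- the edges are good ----------

theorem first_last_len (r : String)
    (h : ((PySem.Str.pyGet? r 0).getD ' ') ≠ ((PySem.Str.pyGet? r (-1)).getD ' ')) :
    2 ≤ PySem.Str.len r := by
  rw [PySem.Str.len_eq]
  have hb : 2 ≤ r.toList.length := by
    by_contra hlt
    apply h
    cases hr : r.toList with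
    | nil => simp [pysem, hr, PySem.List.pyGet?]
    | cons c t =>
      cases t with
      | nil => simp [pysem, hr, PySem.List.pyGet?, PySem.List.pyIdx?]
      | cons c2 t2 => rw [hr] at hlt; simp at hlt
  exact_mod_cast hb

theorem fixRuas_good (ruas : List String) : GoodEdges (fixRuas ruas) := by
  unfold fixRuas
  suffices h : ∀ acc, GoodEdges acc → GoodEdges (ruas.foldl (fun final rua =>
      let a := (PySem.Str.pyGet? rua 0).getD ' '
      let b := (PySem.Str.pyGet? rua (-1)).getD ' '
      if a ≠ b then final ++ [(a, b, PySem.Str.len rua)] else final) acc) by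
    exact h [] (by intro e he; simp at he)
  induction ruas with
  | nil => intro acc h; exact h
  | cons r rs ih =>
    intro acc h
    rw [List.foldl_cons]
    apply ih
    by_cases hab : ((PySem.Str.pyGet? r 0).getD ' ') ≠ ((PySem.Str.pyGet? r (-1)).getD ' ')
    · simp only [if_pos hab]
      intro e he
      rcases List.mem_append.mp he with he' | he'
      · exact h e he'
      · have he'' : e = (((PySem.Str.pyGet? r 0).getD ' '), ((PySem.Str.pyGet? r (-1)).getD ' '),
            PySem.Str.len r) := by simpa using he'
        subst he''
        exact ⟨hab, first_last_len r hab⟩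
    · simp only [if_neg hab]
      exact h

-- ---------- putting the per-source dictionaries together ----------

theorem values_fold_eq (d1 d2 : PySem.Dict Char Int) (h1 : d1.keys.Nodup) (h2 : d2.keys.Nodup)
    (h : ∀ v, d1.get? v = d2.get? v) (m : Int) :
    d1.values.foldl (fun m y => max y m) m = d2.values.foldl (fun m y => max y m) m := by
  have hperm : d1.keys.Perm d2.keys := by
    refine (List.perm_ext_iff_of_nodup h1 h2).mpr ?_
    intro k
    rw [← Decidable.not_iff_not]
    rw [← PySem.Dict.get?_eq_none_iff_not_mem_keys, ← PySem.Dict.get?_eq_none_iff_not_mem_keys, h k]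
  have hv1 : d1.values = d1.keys.map (fun k => d1.getD k 0) := PySem.Dict.values_eq_map_keys d1 h1 0
  have hv2 : d2.values = d2.keys.map (fun k => d2.getD k 0) := PySem.Dict.values_eq_map_keys d2 h2 0
  have hfun : (fun k => d1.getD k 0) = (fun k => d2.getD k 0) := by
    funext k
    show (d1.get? k).getD 0 = (d2.get? k).getD 0
    rw [h k]
  have hperm2 : d1.values.Perm d2.values := by
    rw [hv1, hv2, hfun]
    exact hperm.map _
  exact hperm2.foldl_eq (f := fun m y => max y m) m

-- ===== VERDICT (by name: the statement is the Claim_ definition above) =====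
theorem tamanho_spec : Claim_equal_tamanho := by
  unfold Claim_equal_tamanho
  intro ruas _ _
  unfold Spec_tamanho tamanho tamanho_alt
  have hedges : edgesB ruas = fixRuas ruas := rfl
  rw [hedges]
  have hg : GoodEdges (fixRuas ruas) := fixRuas_good ruas
  rw [← vertsB_eq (fixRuas ruas)]
  apply PySem.List.foldl_congr_mem
  intro m x hx
  have hA := caminhosA_char (fixRuas ruas) x hg hx
  have hBchar := bf_char (fixRuas ruas) x hg hx
  apply values_fold_eq _ _ hA.2 (bf_nodup (fixRuas ruas) x _) _ m
  intro v
  cases hav : (caminhosA (fixRuas ruas) x).get? v with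
  | some c => exact ((hBchar v c).mpr ((hA.1 v c).mp hav)).symm
  | none =>
    cases hbv : (bfFrom (fixRuas ruas) (vertsB (fixRuas ruas)).length x).get? v with
    | some c =>
      have hac := (hA.1 v c).mpr ((hBchar v c).mp hbv)
      rw [hav] at hac
      cases hac
    | none => rfl
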